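-- pv_equiv track=rewrite | github.com/edissonchamorroc/Retos-Misi-nTic | Ciclo1/reto_5.py | conteoTendeciaAcciones
-- ===== SOURCE A (Python) =====
-- def conteoTendeciaAcciones(registro):
--     sube=0
--     baja=0
--     estable=0
--     for fila in range(0,len(registro),1):
--         if registro[fila][1] == 'SUBE':
--             sube+=1
--         elif registro[fila][1] == 'BAJA':
--             baja+=1
--         else:
--             estable+=1
--
--     return sube,baja,estable
-- ===== SOURCE B (Python) =====
-- def conteoTendeciaAcciones(registro):
--     segundos = [fila[1] for fila in registro]
--     sube = segundos.count('SUBE')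
--     baja = segundos.count('BAJA')
--     return sube, baja, len(registro) - sube - baja
-- ===== Notes on version B (the rewrite author's own statement) =====
-- stated objective: idiomatic
-- what changed: B extracts the second fields once, counts 'SUBE' and 'BAJA' with list.count, and derives the stable count by subtraction instead of a per-element three-way branch with three accumulators.
import Mathlib
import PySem

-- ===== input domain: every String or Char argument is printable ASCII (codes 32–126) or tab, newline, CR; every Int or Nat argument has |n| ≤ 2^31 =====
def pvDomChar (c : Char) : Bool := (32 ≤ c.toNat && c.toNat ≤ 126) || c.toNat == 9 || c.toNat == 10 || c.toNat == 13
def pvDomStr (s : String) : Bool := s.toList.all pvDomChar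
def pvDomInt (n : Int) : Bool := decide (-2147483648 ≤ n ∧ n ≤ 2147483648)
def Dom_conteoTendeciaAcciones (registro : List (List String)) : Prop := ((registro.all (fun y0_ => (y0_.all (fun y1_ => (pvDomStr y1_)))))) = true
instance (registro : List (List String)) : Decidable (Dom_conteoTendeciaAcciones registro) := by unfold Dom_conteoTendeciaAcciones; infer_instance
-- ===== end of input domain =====

-- B counts the second fields with list.count and derives the stable count by subtraction (idiomatic rewrite; same cost).


-- ===== PORT A =====
def conteoTendeciaAcciones (registro : List (List String)) : Int × Int × Int :=
  (PySem.List.pyRange 0 registro.length 1).foldl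
    (fun st fila =>
      let v := PySem.List.pyGetD (PySem.List.pyGetD registro fila []) 1 ""
      if v = "SUBE" then (st.1 + 1, st.2.1, st.2.2)
      else if v = "BAJA" then (st.1, st.2.1 + 1, st.2.2)
      else (st.1, st.2.1, st.2.2 + 1))
    (0, 0, 0)

-- ===== PORT B =====
def conteoTendeciaAcciones_alt (registro : List (List String)) : Int × Int × Int :=
  let segundos := registro.map (fun fila => PySem.List.pyGetD fila 1 "")
  let sube : Int := PySem.List.count segundos "SUBE"
  let baja : Int := PySem.List.count segundos "BAJA"
  (sube, baja, (registro.length : Int) - sube - baja)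

-- ===== PRECONDITION & SPEC =====
-- A evaluates registro[fila][1], an IndexError on any row shorter than 2; Pre_ excludes exactly those inputs.
def Pre_conteoTendeciaAcciones (registro : List (List String)) : Prop :=
  ∀ fila ∈ registro, 2 ≤ fila.length
instance (registro : List (List String)) : Decidable (Pre_conteoTendeciaAcciones registro) := by
  unfold Pre_conteoTendeciaAcciones; infer_instance

def pvWitness_conteoTendeciaAcciones : List (List String) :=
  [["A", "SUBE"], ["B", "BAJA"], ["C", "IGUAL"]]

def Spec_conteoTendeciaAcciones (registro : List (List String)) (out : Int × Int × Int) : Prop := out = conteoTendeciaAcciones_alt registro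
instance (registro : List (List String)) (out : Int × Int × Int) : Decidable (Spec_conteoTendeciaAcciones registro out) := by unfold Spec_conteoTendeciaAcciones; infer_instance

-- ===== CLAIM (what is proved, stated in full; the proofs are below) =====
def Claim_equal_conteoTendeciaAcciones : Prop := ∀ (registro : List (List String)), Dom_conteoTendeciaAcciones registro → Pre_conteoTendeciaAcciones registro → Spec_conteoTendeciaAcciones registro (conteoTendeciaAcciones registro)

-- ===== LEMMAS AND PROOFS =====

-- A's index loop, restricted to the first n rows, read as a fold over the rows themselves.
theorem foldA_take (registro : List (List String)) (n : Nat) (hn : n ≤ registro.length) (st : Int × Int × Int) :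
    (PySem.List.pyRange 0 n 1).foldl
      (fun st fila =>
        let v := PySem.List.pyGetD (PySem.List.pyGetD registro fila []) 1 ""
        if v = "SUBE" then (st.1 + 1, st.2.1, st.2.2)
        else if v = "BAJA" then (st.1, st.2.1 + 1, st.2.2)
        else (st.1, st.2.1, st.2.2 + 1)) st
    = (registro.take n).foldl
      (fun st fila =>
        let v := PySem.List.pyGetD fila 1 ""
        if v = "SUBE" then (st.1 + 1, st.2.1, st.2.2)
        else if v = "BAJA" then (st.1, st.2.1 + 1, st.2.2)
        else (st.1, st.2.1, st.2.2 + 1)) st := by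
  induction n generalizing st with
  | zero => simp
  | succ m ih =>
    have hm : m < registro.length := hn
    have hr : PySem.List.pyRange 0 (m + 1 : Nat) 1
        = PySem.List.pyRange 0 m 1 ++ [(m : Int)] := by
      have := PySem.List.pyRange_one_succ_right (a := 0) (b := (m : Int)) (by exact_mod_cast Nat.zero_le m)
      simpa using this
    have ht : registro.take (m + 1) = registro.take m ++ [registro[m]] :=
      List.take_succ_eq_append_getElem hm  -- name may differ; fixed below if so
    rw [hr, List.foldl_append, ih (Nat.le_of_lt hm), ht, List.foldl_append]
    simp [PySem.List.pyGetD_natCast, List.getElem?_eq_getElem hm]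

theorem B_cons (x : List String) (xs : List (List String)) :
    conteoTendeciaAcciones_alt (xs ++ [x])
    = (let v := PySem.List.pyGetD x 1 ""
       let p := conteoTendeciaAcciones_alt xs
       if v = "SUBE" then (p.1 + 1, p.2.1, p.2.2)
       else if v = "BAJA" then (p.1, p.2.1 + 1, p.2.2)
       else (p.1, p.2.1, p.2.2 + 1)) := by
  simp only [conteoTendeciaAcciones_alt, List.map_append, List.map_cons, List.map_nil,
    PySem.List.count, List.count_append, List.length_append]
  split_ifs with h1 h2 <;>
    simp_all [List.count_nil] <;> ring

-- ===== VERDICT (by name: the statement is the Claim_ definition above) =====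
theorem conteoTendeciaAcciones_spec : Claim_equal_conteoTendeciaAcciones := by
  intro registro hD hP
  unfold Spec_conteoTendeciaAcciones conteoTendeciaAcciones
  clear hD hP
  rw [foldA_take registro registro.length le_rfl]
  rw [List.take_length]
  induction registro using List.reverseRecOn with
  | nil => simp [conteoTendeciaAcciones_alt, PySem.List.count]
  | append_singleton xs x ih =>
    rw [List.foldl_append, ih, B_cons]
    simp
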